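-- pv_equiv track=rewrite | github.com/Bluuubery/Problem_Solving | 프로그래머스/lv3/49191. 순위/순위.py | dfs
-- ===== SOURCE A (Python) =====
-- def dfs(node, graph, visited):
--
--     visited[node] = 1
--
--     for next in graph[node]:
--
--         if visited[next]:
--             continue
--
--         visited[next] = 1
--         dfs(next, graph, visited)
--
--     # 방문한 노드 (승자 or 패자) 수 반환
--     return sum(visited) - 1
-- ===== SOURCE B (Python) =====
-- def dfs(node, graph, visited):
--     # Iterative DFS with an explicit (vertex, neighbor-index) stack instead of recursion.
--     # Performs the same in-place marking of `visited` as the recursive version.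
--     visited[node] = 1
--     stack = [(node, 0)]
--     while stack:
--         v, i = stack[-1]
--         neighbors = graph[v]
--         if i == len(neighbors):
--             stack.pop()
--             continue
--         stack[-1] = (v, i + 1)
--         nxt = neighbors[i]
--         if visited[nxt]:
--             continue
--         visited[nxt] = 1
--         stack.append((nxt, 0))
--     return sum(visited) - 1
-- ===== Notes on version B (the rewrite author's own statement) =====
-- stated objective: alternative
-- what changed: A's recursive DFS is replaced by an iterative DFS driving an explicit stack of (vertex, neighbor-index) frames in a single while loop, removing recursion entirely; both mark visited in place identically and return sum(visited) - 1.
-- outside the precondition, e.g. on dfs(0, [[], [1, 9]], [0, 0]): A returns 0, B returns 0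
import Mathlib
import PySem

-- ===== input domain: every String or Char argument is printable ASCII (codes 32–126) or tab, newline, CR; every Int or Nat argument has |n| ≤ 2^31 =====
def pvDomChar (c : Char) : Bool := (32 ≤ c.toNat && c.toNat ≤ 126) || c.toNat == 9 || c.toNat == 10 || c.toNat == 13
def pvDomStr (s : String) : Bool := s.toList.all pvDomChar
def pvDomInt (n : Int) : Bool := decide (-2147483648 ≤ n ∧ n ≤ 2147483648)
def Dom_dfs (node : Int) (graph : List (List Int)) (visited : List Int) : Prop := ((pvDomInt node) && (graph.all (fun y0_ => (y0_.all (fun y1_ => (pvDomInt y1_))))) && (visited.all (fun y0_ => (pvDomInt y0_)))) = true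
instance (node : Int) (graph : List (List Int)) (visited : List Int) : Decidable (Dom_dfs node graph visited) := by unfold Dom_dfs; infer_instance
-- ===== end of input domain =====

-- B replaces A's recursive DFS by an iterative DFS with an explicit (vertex, neighbor-index)
-- stack (objective: alternative decomposition); both mutate `visited` in place identically,
-- and the equivalence proved here is about the RETURN value.

-- ===== PORT A =====
-- Recursive DFS, ported with a fuel parameter (`visited.count 0 + 1`) as a pure totality
-- guard: every nested Python call is preceded by flipping a 0 entry of `visited` to 1,
-- so the recursion depth never exceeds the number of zeros plus one.
mutual
  -- body of Python's `dfs` (mutates `visited`, returns the final list)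
  def dfsGo : Nat → List (List Int) → Int → List Int → List Int
    | 0, _, _, vis => vis
    | f+1, g, node, vis =>
      match PySem.List.pySet? vis node 1 with      -- visited[node] = 1
      | none => vis                                -- IndexError (outside Pre_)
      | some vis1 =>
        match PySem.List.pyGet? g node with        -- graph[node]
        | none => vis1                             -- IndexError (outside Pre_)
        | some ns => dfsLoop f g ns vis1
  -- the `for next in graph[node]` loop
  def dfsLoop : Nat → List (List Int) → List Int → List Int → List Int
    | _, _, [], vis => vis
    | f, g, n :: ns, vis =>
      match PySem.List.pyGet? vis n with           -- if visited[next]: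
      | none => vis                                -- IndexError (outside Pre_)
      | some x =>
        if x ≠ 0 then dfsLoop f g ns vis           -- continue
        else
          match PySem.List.pySet? vis n 1 with     -- visited[next] = 1
          | none => vis
          | some vis1 => dfsLoop f g ns (dfsGo f g n vis1)   -- dfs(next, graph, visited)
end


def dfs (node : Int) (graph : List (List Int)) (visited : List Int) : Int :=
  (dfsGo (visited.count 0 + 1) graph node visited).sum - 1   -- return sum(visited) - 1


-- lemmas needed by dfsMachine's termination argument (cited in decreasing_by)
theorem pv_pyIdx?_some_lt {n : Nat} {i : Int} {k : Nat} (h : PySem.List.pyIdx? n i = some k) : k < n := by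
  unfold PySem.List.pyIdx? at h
  split_ifs at h <;> simp_all <;> omega

theorem pv_pyGet?_some_inRange {α : Type} {xs : List α} {i : Int} {x : α}
    (h : PySem.List.pyGet? xs i = some x) : PySem.Raise.InRange xs.length i := by
  by_contra hc
  rw [← PySem.List.pyGet?_eq_none_iff xs i] at hc
  rw [hc] at h
  cases h

theorem pv_count_set_one_lt (l : List Int) (k : Nat) (hk : k < l.length) (h0 : l[k] = 0) :
    (l.set k 1).count 0 < l.count 0 := by
  induction l generalizing k with
  | nil => simp at hk
  | cons a t ih =>
    cases k with
    | zero =>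
      simp only [List.getElem_cons_zero] at h0
      subst h0
      simp only [List.set_cons_zero, List.count_cons]
      have h1 : ((1:Int) == 0) = false := by decide
      have h2 : ((0:Int) == 0) = true := by decide
      rw [h1, h2]
      simp only [Bool.false_eq_true, if_false, if_pos]
      omega
    | succ k =>
      simp only [List.length_cons, Nat.succ_lt_succ_iff] at hk
      simp only [List.getElem_cons_succ] at h0
      simpa [List.count_cons] using ih k hk h0

theorem pv_pySet?_eq_set {α : Type} {xs w : List α} {i : Int} {v : α}
    (h : PySem.List.pySet? xs i v = some w) :
    ∃ k, PySem.List.pyIdx? xs.length i = some k ∧ w = xs.set k v := by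
  unfold PySem.List.pySet? at h
  cases hk : PySem.List.pyIdx? xs.length i with
  | none => rw [hk] at h; cases h
  | some k =>
    rw [hk] at h
    simp only [Option.map_some, Option.some.injEq] at h
    exact ⟨k, rfl, h.symm⟩

theorem pv_pyGet?_eq_of_idx {α : Type} {xs : List α} {i : Int} {k : Nat}
    (hk : PySem.List.pyIdx? xs.length i = some k) : PySem.List.pyGet? xs i = xs[k]? := by
  unfold PySem.List.pyGet?
  rw [hk]
  rfl

theorem pv_count_pySet?_lt {vis vis1 : List Int} {n : Int}
    (hg : PySem.List.pyGet? vis n = some 0) (hs : PySem.List.pySet? vis n 1 = some vis1) :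
    vis1.count 0 < vis.count 0 := by
  obtain ⟨k, hk, rfl⟩ := pv_pySet?_eq_set hs
  have hlt : k < vis.length := pv_pyIdx?_some_lt hk
  have hget := pv_pyGet?_eq_of_idx (xs := vis) hk
  rw [hget, List.getElem?_eq_getElem hlt] at hg
  exact pv_count_set_one_lt vis k hlt (Option.some.inj hg)

-- ===== PORT B =====
-- weight of the pending stack, for termination only
def pvFrameWeight (g : List (List Int)) (stack : List (Int × Int)) : Nat :=
  (stack.map (fun p => ((((PySem.List.pyGet? g p.1).getD []).length : Int) + 1 - p.2).toNat)).sum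

-- the `while stack:` loop of Source B; head of the list is the top of the stack
def dfsMachine (g : List (List Int)) : List (Int × Int) → List Int → List Int
  | [], vis => vis
  | (v, i) :: rest, vis =>
    match hv : PySem.List.pyGet? g v with          -- neighbors = graph[v]
    | none => vis                                  -- IndexError (outside Pre_)
    | some ns =>
      if i = (ns.length : Int) then dfsMachine g rest vis      -- stack.pop(); continue
      else
        match hn : PySem.List.pyGet? ns i with     -- nxt = neighbors[i]  (after stack[-1] = (v, i+1))
        | none => vis                              -- IndexError (outside Pre_)
        | some nxt =>
          match hx : PySem.List.pyGet? vis nxt with    -- if visited[nxt]: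
          | none => vis                            -- IndexError (outside Pre_)
          | some x =>
            if x ≠ 0 then dfsMachine g ((v, i + 1) :: rest) vis      -- continue
            else
              match hs : PySem.List.pySet? vis nxt 1 with    -- visited[nxt] = 1
              | none => vis
              | some vis1 => dfsMachine g ((nxt, 0) :: (v, i + 1) :: rest) vis1   -- stack.append((nxt, 0))
termination_by stack vis => (vis.count 0, pvFrameWeight g stack)
decreasing_by
  · apply Prod.Lex.right
    rename_i hi
    have h1 := pv_pyGet?_some_inRange hv
    simp only [pvFrameWeight, List.map_cons, List.sum_cons, hv, Option.getD_some, hi]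
    omega
  · apply Prod.Lex.right
    have h1 := pv_pyGet?_some_inRange hn
    obtain ⟨hlo, hhi⟩ := h1
    simp only [pvFrameWeight, List.map_cons, List.sum_cons, hv, Option.getD_some]
    omega
  · rename_i hne hx0
    apply Prod.Lex.left
    rw [not_not] at hx0
    exact pv_count_pySet?_lt (hx0 ▸ hx) hs

def dfs_alt (node : Int) (graph : List (List Int)) (visited : List Int) : Int :=
  match PySem.List.pySet? visited node 1 with      -- visited[node] = 1
  | none => 0                                      -- IndexError (outside Pre_)
  | some vis1 => (dfsMachine graph [(node, 0)] vis1).sum - 1   -- return sum(visited) - 1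

-- ===== PRECONDITION & SPEC =====
-- row `row` of the graph can be scanned by A without an IndexError, given the original `visited`
def pvRowOk (graph : List (List Int)) (visited : List Int) (row : List Int) : Prop :=
  ∀ j ∈ row, PySem.Raise.InRange visited.length j ∧
    (PySem.List.pyGetD visited j 0 = 0 → PySem.Raise.InRange graph.length j)

-- row index v is the target of some adjacency entry that is a valid, initially-unvisited vertex
def pvCandEdge (graph : List (List Int)) (visited : List Int) (v : Nat) : Prop :=
  ∃ l ∈ graph, ∃ j ∈ l, PySem.Raise.InRange visited.length j ∧
    PySem.List.pyGetD visited j 0 = 0 ∧ PySem.List.pyIdx? graph.length j = some v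

-- Pre_dfs excludes inputs on which A raises IndexError: `node` out of Python's index range, or an
-- out-of-range adjacency entry in a row the traversal could scan; 'could scan' is over-approximated
-- as node's own row plus every row whose index is the target of an edge into a valid unvisited
-- vertex, so a few inputs on which A returns (a bad row pointed to only from rows that are
-- themselves never reached) are conservatively excluded too — see the cite in the claim.
def Pre_dfs (node : Int) (graph : List (List Int)) (visited : List Int) : Prop :=
  PySem.Raise.InRange visited.length node ∧ PySem.Raise.InRange graph.length node ∧
  ∀ v, (hv : v < graph.length) →
    (PySem.List.pyIdx? graph.length node = some v ∨ pvCandEdge graph visited v) →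
    pvRowOk graph visited graph[v]

instance (node : Int) (graph : List (List Int)) (visited : List Int) : Decidable (Pre_dfs node graph visited) := by
  unfold Pre_dfs pvCandEdge pvRowOk; infer_instance

def pvWitness_dfs : Int × List (List Int) × List Int := (0, [[1], [0]], [0, 0])

def Spec_dfs (node : Int) (graph : List (List Int)) (visited : List Int) (out : Int) : Prop := out = dfs_alt node graph visited
instance (node : Int) (graph : List (List Int)) (visited : List Int) (out : Int) : Decidable (Spec_dfs node graph visited out) := by unfold Spec_dfs; infer_instance

-- ===== CLAIM (what is proved, stated in full; the proofs are below) =====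
def Claim_equal_dfs : Prop := ∀ (node : Int) (graph : List (List Int)) (visited : List Int), Dom_dfs node graph visited → Pre_dfs node graph visited → Spec_dfs node graph visited (dfs node graph visited)

-- ===== LEMMAS AND PROOFS =====

theorem pv_count_set_one_le (l : List Int) (k : Nat) : (l.set k 1).count 0 ≤ l.count 0 := by
  induction l generalizing k with
  | nil => simp
  | cons a t ih =>
    cases k with
    | zero =>
      simp only [List.set_cons_zero, List.count_cons]
      have h1 : ((1:Int) == 0) = false := by decide
      rw [h1]
      simp only [Bool.false_eq_true, if_false]
      split <;> omega
    | succ k => simpa [List.count_cons] using ih k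



theorem pv_length_pySet? {α : Type} {xs w : List α} {i : Int} {v : α}
    (h : PySem.List.pySet? xs i v = some w) : w.length = xs.length := by
  obtain ⟨k, _, rfl⟩ := pv_pySet?_eq_set h
  simp

theorem pv_count_pySet?_le {vis vis1 : List Int} {n : Int}
    (h : PySem.List.pySet? vis n 1 = some vis1) : vis1.count 0 ≤ vis.count 0 := by
  obtain ⟨k, _, rfl⟩ := pv_pySet?_eq_set h
  exact pv_count_set_one_le vis k

theorem pv_pySet?_idem {vis vis1 : List Int} {n : Int}
    (h : PySem.List.pySet? vis n 1 = some vis1) : PySem.List.pySet? vis1 n 1 = some vis1 := by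
  obtain ⟨k, hk, rfl⟩ := pv_pySet?_eq_set h
  unfold PySem.List.pySet?
  rw [List.length_set, hk]
  simp [List.set_set]

-- step equations for A's port, in the form the equivalence proof uses
theorem pv_dfsGo_succ {f : Nat} {g : List (List Int)} {node : Int} {vis vis1 ns : List Int}
    (h1 : PySem.List.pySet? vis node 1 = some vis1) (h2 : PySem.List.pyGet? g node = some ns) :
    dfsGo (f + 1) g node vis = dfsLoop f g ns vis1 := by
  rw [dfsGo]
  split
  next heq => rw [h1] at heq; cases heq
  next w heq =>
    rw [h1] at heq; injection heq with heq; subst heq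
    split
    next heq2 => rw [h2] at heq2; cases heq2
    next ns' heq2 => rw [h2] at heq2; injection heq2 with heq2; subst heq2; rfl

theorem pv_dfsLoop_skip {f : Nat} {g : List (List Int)} {n : Int} {ns vis : List Int} {x : Int}
    (h1 : PySem.List.pyGet? vis n = some x) (hx : x ≠ 0) :
    dfsLoop f g (n :: ns) vis = dfsLoop f g ns vis := by
  rw [dfsLoop]
  split
  next heq => rw [h1] at heq; cases heq
  next y heq =>
    rw [h1] at heq; injection heq with heq; subst heq
    rw [if_pos hx]

theorem pv_dfsLoop_mark {f : Nat} {g : List (List Int)} {n : Int} {ns vis vis1 : List Int}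
    (h1 : PySem.List.pyGet? vis n = some 0) (h2 : PySem.List.pySet? vis n 1 = some vis1) :
    dfsLoop f g (n :: ns) vis = dfsLoop f g ns (dfsGo f g n vis1) := by
  rw [dfsLoop]
  split
  next heq => rw [h1] at heq; cases heq
  next y heq =>
    rw [h1] at heq; injection heq with heq; subst heq
    rw [if_neg (by simp)]
    split
    next heq2 => rw [h2] at heq2; cases heq2
    next w heq2 => rw [h2] at heq2; injection heq2 with heq2; subst heq2; rfl


theorem pv_pyGet?_parts {α : Type} {xs : List α} {i : Int} {x : α}
    (h : PySem.List.pyGet? xs i = some x) :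
    ∃ k, PySem.List.pyIdx? xs.length i = some k ∧ xs[k]? = some x := by
  unfold PySem.List.pyGet? at h
  cases hk : PySem.List.pyIdx? xs.length i with
  | none => rw [hk] at h; cases h
  | some k => rw [hk] at h; exact ⟨k, rfl, h⟩

theorem pv_pyGetD_zero {vis0 : List Int} {i : Int} {k : Nat}
    (hk : PySem.List.pyIdx? vis0.length i = some k) (h0 : vis0[k]? = some 0) :
    PySem.List.pyGetD vis0 i 0 = 0 := by
  unfold PySem.List.pyGetD PySem.List.pyGet?
  rw [hk]
  simp [h0]

theorem pv_mask_set {l : List Int} {m : Nat} {k : Nat}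
    (h : (l.set m 1)[k]? = some 0) : l[k]? = some 0 := by
  rw [List.getElem?_set] at h
  split at h
  · split at h
    · cases h
    · cases h
  · exact h

theorem pv_mask_pySet? {vis vis1 : List Int} {n : Int}
    (hs : PySem.List.pySet? vis n 1 = some vis1) (k : Nat)
    (h : vis1[k]? = some 0) : vis[k]? = some 0 := by
  obtain ⟨m, _, rfl⟩ := pv_pySet?_eq_set hs
  exact pv_mask_set h

-- length is preserved, the zero-count never grows, and no entry ever becomes 0 along A's recursion
mutual
theorem pv_dfsGo_pres : ∀ (f : Nat) (g : List (List Int)) (node : Int) (vis : List Int),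
    (dfsGo f g node vis).length = vis.length ∧ (dfsGo f g node vis).count 0 ≤ vis.count 0 ∧
      ∀ k : Nat, (dfsGo f g node vis)[k]? = some 0 → vis[k]? = some 0
  | 0, g, node, vis => by simp [dfsGo]
  | f+1, g, node, vis => by
    rw [dfsGo]
    split
    next => exact ⟨rfl, le_refl _, fun k h => h⟩
    next vis1 h1 =>
      have hl := pv_length_pySet? h1
      have hc := pv_count_pySet?_le h1
      have hm := pv_mask_pySet? h1
      split
      next => exact ⟨hl, hc, hm⟩
      next ns h2 =>
        have h3 := pv_dfsLoop_pres f g ns vis1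
        exact ⟨h3.1.trans hl, h3.2.1.trans hc, fun k h => hm k (h3.2.2 k h)⟩

theorem pv_dfsLoop_pres : ∀ (f : Nat) (g : List (List Int)) (ns : List Int) (vis : List Int),
    (dfsLoop f g ns vis).length = vis.length ∧ (dfsLoop f g ns vis).count 0 ≤ vis.count 0 ∧
      ∀ k : Nat, (dfsLoop f g ns vis)[k]? = some 0 → vis[k]? = some 0
  | f, g, [], vis => by simp [dfsLoop]
  | f, g, n :: ns, vis => by
    rw [dfsLoop]
    split
    next => exact ⟨rfl, le_refl _, fun k h => h⟩
    next x h1 =>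
      split_ifs with hx
      · exact pv_dfsLoop_pres f g ns vis
      · split
        next => exact ⟨rfl, le_refl _, fun k h => h⟩
        next vis1 h2 =>
          have hl := pv_length_pySet? h2
          have hc := pv_count_pySet?_le h2
          have hm := pv_mask_pySet? h2
          have hgo := pv_dfsGo_pres f g n vis1
          have hlp := pv_dfsLoop_pres f g ns (dfsGo f g n vis1)
          exact ⟨hlp.1.trans (hgo.1.trans hl), hlp.2.1.trans (hgo.2.1.trans hc),
            fun k h => hm k (hgo.2.2 k (hlp.2.2 k h))⟩
end

-- THE BRIDGE: running B's machine with top frame (v, i) equals finishing A's loop for v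
-- from neighbor index i and continuing with the rest of the stack.
theorem pv_bridge (g : List (List Int)) (vis0 : List Int)
    (Hsafe : ∀ w, (hw : w < g.length) → pvCandEdge g vis0 w → pvRowOk g vis0 g[w])
    (f : Nat) (vis : List Int) (hL : vis.length = vis0.length) (hf : vis.count 0 ≤ f)
    (hmask : ∀ k : Nat, vis[k]? = some 0 → vis0[k]? = some 0)
    (v i : Int) (ns : List Int) (rest : List (Int × Int))
    (hv : PySem.List.pyGet? g v = some ns) (hrow : pvRowOk g vis0 ns)
    (hi0 : 0 ≤ i) (hile : i.toNat ≤ ns.length) :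
    dfsMachine g ((v, i) :: rest) vis = dfsMachine g rest (dfsLoop f g (ns.drop i.toNat) vis) := by
  rw [dfsMachine]
  split
  next heq => rw [hv] at heq; cases heq
  next ns' heq =>
    rw [hv] at heq
    injection heq with heq; subst heq
    split_ifs with hEnd
    · have hnil : ns.drop i.toNat = [] := List.drop_eq_nil_of_le (by omega)
      rw [hnil, dfsLoop]
    · have hlt : i.toNat < ns.length := by omega
      have hidrop : ns.drop i.toNat = ns[i.toNat] :: ns.drop (i.toNat + 1) :=
        List.drop_eq_getElem_cons hlt
      have hget : PySem.List.pyGet? ns i = some ns[i.toNat] :=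
        PySem.List.pyGet?_eq_some_getElem ns hi0 (by omega)
      have hmem_ns : ns ∈ g := PySem.List.mem_of_pyGet?_eq_some g hv
      have hmem : ns[i.toNat] ∈ ns := List.getElem_mem hlt
      obtain ⟨hV, hG0⟩ := hrow ns[i.toNat] hmem
      split
      next heq => rw [hget] at heq; cases heq
      next nxt heq =>
        rw [hget] at heq
        injection heq with heq; subst heq
        split
        next heq2 =>
          rw [PySem.List.pyGet?_eq_none_iff] at heq2
          rw [hL] at heq2
          exact absurd hV heq2
        next x heq2 =>
          split_ifs with hx0
          · -- visited[nxt] truthy: skip in both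
            have htn : (i + 1).toNat = i.toNat + 1 := by omega
            have hrec := pv_bridge g vis0 Hsafe f vis hL hf hmask v (i + 1) ns rest hv hrow
              (by omega) (by omega)
            rw [htn] at hrec
            rw [hrec, hidrop, pv_dfsLoop_skip heq2 hx0]
          · -- visited[nxt] falsy: mark and descend in both
            rw [not_not] at hx0
            subst hx0
            -- the entry is 0 now, hence 0 in the original visited as well
            obtain ⟨k, hk, hk0⟩ := pv_pyGet?_parts heq2
            rw [hL] at hk
            have h00 : PySem.List.pyGetD vis0 ns[i.toNat] 0 = 0 :=
              pv_pyGetD_zero hk (hmask k (by rw [← hL] at hk; exact hk0))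
            have hG : PySem.Raise.InRange g.length ns[i.toNat] := hG0 h00
            split
            next heq3 =>
              rw [PySem.List.pySet?_eq_none_iff] at heq3
              rw [hL] at heq3
              exact absurd hV heq3
            next vis1 heq3 =>
              have hlen1 : vis1.length = vis0.length := (pv_length_pySet? heq3).trans hL
              have hcnt1 : vis1.count 0 < vis.count 0 := pv_count_pySet?_lt heq2 heq3
              have hmask1 : ∀ m : Nat, vis1[m]? = some 0 → vis0[m]? = some 0 :=
                fun m h => hmask m (pv_mask_pySet? heq3 m h)
              obtain ⟨f', rfl⟩ : ∃ f', f = f' + 1 := ⟨f - 1, by omega⟩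
              cases hg2 : PySem.List.pyGet? g ns[i.toNat] with
              | none =>
                rw [PySem.List.pyGet?_eq_none_iff] at hg2
                exact absurd hG hg2
              | some ns2 =>
                -- ns2 is the row of a candidate vertex, so it is safe to scan
                obtain ⟨w, hw, hw2⟩ := pv_pyGet?_parts hg2
                have hwlt : w < g.length := pv_pyIdx?_some_lt hw
                have hrow2 : pvRowOk g vis0 ns2 := by
                  have hcand : pvCandEdge g vis0 w := ⟨ns, hmem_ns, ns[i.toNat], hmem, hV, h00, hw⟩
                  have := Hsafe w hwlt hcand
                  rwa [(by rw [List.getElem?_eq_getElem hwlt] at hw2; exact Option.some.inj hw2 :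
                        g[w] = ns2)] at this
                have hgo : dfsGo (f' + 1) g ns[i.toNat] vis1 = dfsLoop f' g ns2 vis1 :=
                  pv_dfsGo_succ (pv_pySet?_idem heq3) hg2
                have h1 := pv_bridge g vis0 Hsafe f' vis1 hlen1 (by omega) hmask1 ns[i.toNat] 0 ns2
                  ((v, i + 1) :: rest) hg2 hrow2 le_rfl (by simp)
                have hz : ((0 : Int)).toNat = 0 := rfl
                rw [hz, List.drop_zero] at h1
                have hpres := pv_dfsLoop_pres f' g ns2 vis1
                have hmask2 : ∀ m : Nat, (dfsLoop f' g ns2 vis1)[m]? = some 0 → vis0[m]? = some 0 :=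
                  fun m h => hmask1 m (hpres.2.2 m h)
                have htn : (i + 1).toNat = i.toNat + 1 := by omega
                have h2 := pv_bridge g vis0 Hsafe (f' + 1) (dfsLoop f' g ns2 vis1)
                  (hpres.1.trans hlen1) (by omega) hmask2 v (i + 1) ns rest hv hrow
                  (by omega) (by omega)
                rw [htn] at h2
                rw [h1, h2, hidrop, pv_dfsLoop_mark heq2 heq3, hgo]
termination_by (vis.count 0, ns.length - i.toNat)
decreasing_by
  · apply Prod.Lex.right
    omega
  · apply Prod.Lex.left
    omega
  · apply Prod.Lex.left
    have := hpres.2.1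
    omega

-- ===== VERDICT (by name: the statement is the Claim_ definition above) =====
theorem dfs_spec : Claim_equal_dfs := by
  intro node graph visited hDom hPre
  obtain ⟨hVn, hGn, Hsafe⟩ := hPre
  unfold Spec_dfs dfs dfs_alt
  split
  next hset =>
    rw [PySem.List.pySet?_eq_none_iff] at hset
    exact absurd hVn hset
  next vis1 hset =>
    cases hgn : PySem.List.pyGet? graph node with
    | none =>
      rw [PySem.List.pyGet?_eq_none_iff] at hgn
      exact absurd hGn hgn
    | some ns0 =>
      obtain ⟨v0, hv0, hv0get⟩ := pv_pyGet?_parts hgn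
      have hv0lt : v0 < graph.length := pv_pyIdx?_some_lt hv0
      have hrow0 : pvRowOk graph visited ns0 := by
        have := Hsafe v0 hv0lt (Or.inl hv0)
        rwa [(by rw [List.getElem?_eq_getElem hv0lt] at hv0get; exact Option.some.inj hv0get :
              graph[v0] = ns0)] at this
      have hA : dfsGo (visited.count 0 + 1) graph node visited
              = dfsLoop (visited.count 0) graph ns0 vis1 := pv_dfsGo_succ hset hgn
      have hbr := pv_bridge graph visited (fun w hw c => Hsafe w hw (Or.inr c))
        (visited.count 0) vis1 (pv_length_pySet? hset) (pv_count_pySet?_le hset)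
        (pv_mask_pySet? hset) node 0 ns0 [] hgn hrow0 le_rfl (by simp)
      have hz : ((0 : Int)).toNat = 0 := rfl
      rw [hz, List.drop_zero] at hbr
      rw [hA, hbr, dfsMachine]
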